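-- pv_equiv track=rewrite | github.com/maxfraieho/notebooklm-gateway | .git-store/scripts/enforce-frontmatter.py | split_preamble
-- ===== SOURCE A (Python) =====
-- def split_preamble(text: str) -> tuple[str, str]:
--     """
--     Split off any leading content that comes *before* the first YAML fence.
--
--     Preamble = leading blank lines and HTML comments (<!-- ... -->).
--     Returns (preamble, rest) where rest starts at '---' or is the whole text.
--     """
--     preamble_lines: list[str] = []
--     lines = text.splitlines(keepends=True)
--     i = 0
--     while i < len(lines):
--         line = lines[i]
--         stripped = line.strip()
--         if stripped == "":
--             preamble_lines.append(line)
--             i += 1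
--             continue
--         if stripped.startswith("<!--"):
--             # consume until closing -->
--             preamble_lines.append(line)
--             if "-->" not in stripped or stripped == "<!--":
--                 i += 1
--                 while i < len(lines):
--                     preamble_lines.append(lines[i])
--                     if "-->" in lines[i]:
--                         i += 1
--                         break
--                     i += 1
--             else:
--                 i += 1
--             continue
--         # Not blank, not HTML comment → stop
--         break
--     preamble = "".join(preamble_lines)
--     rest = "".join(lines[i:])
--     return preamble, rest
-- ===== SOURCE B (Python) =====
-- def split_preamble(text: str) -> tuple[str, str]:
--     """Flat single-state scan: count the preamble's length in characters,
--     then split the original text once by slicing."""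
--     in_comment = False
--     cut = 0
--     for line in text.splitlines(keepends=True):
--         if in_comment:
--             cut += len(line)
--             if "-->" in line:
--                 in_comment = False
--         else:
--             s = line.strip()
--             if s == "":
--                 cut += len(line)
--             elif s.startswith("<!--"):
--                 cut += len(line)
--                 in_comment = "-->" not in s
--             else:
--                 break
--     return text[:cut], text[cut:]
-- ===== Notes on version B (the rewrite author's own statement) =====
-- stated objective: simpler
-- what changed: Replaces the nested while-loops that accumulate a list of preamble lines with one flat scan carrying an in_comment flag that only counts the preamble's character length, then splits the original text by a single slice instead of joining line lists.
import Mathlib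
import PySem

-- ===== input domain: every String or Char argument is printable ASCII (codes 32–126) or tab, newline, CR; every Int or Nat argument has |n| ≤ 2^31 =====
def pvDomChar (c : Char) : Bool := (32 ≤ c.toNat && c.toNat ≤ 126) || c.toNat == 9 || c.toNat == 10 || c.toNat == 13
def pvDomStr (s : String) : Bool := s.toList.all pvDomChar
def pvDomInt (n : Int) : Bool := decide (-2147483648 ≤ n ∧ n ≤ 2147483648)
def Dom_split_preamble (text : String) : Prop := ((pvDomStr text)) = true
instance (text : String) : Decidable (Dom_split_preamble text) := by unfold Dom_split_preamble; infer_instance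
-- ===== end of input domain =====

-- B replaces A's nested while-loops (which accumulate preamble lines and join them) with one
-- flat scan carrying an `in_comment` flag that only counts characters, then slices the text once.

-- shared helper: text.splitlines(keepends=True). PySem has only the keepends=False form, so this
-- is ported by hand; exact on Dom (tab/newline/CR are the only control chars admitted, so the only
-- Python line breaks that can occur are '\n', '\r' and '\r\n').
def splitKgo : List Char → List Char → List (List Char)
  | cur, [] => if cur = [] then [] else [cur.reverse]
  | cur, '\r' :: '\n' :: rest => (cur.reverse ++ ['\r', '\n']) :: splitKgo [] rest
  | cur, '\r' :: rest => (cur.reverse ++ ['\r']) :: splitKgo [] rest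
  | cur, '\n' :: rest => (cur.reverse ++ ['\n']) :: splitKgo [] rest
  | cur, c :: rest => splitKgo (c :: cur) rest

def splitK (cs : List Char) : List (List Char) := splitKgo [] cs

def pvArrow : List Char := "-->".toList          -- "-->"
def pvOpen : List Char := "<!--".toList          -- "<!--"

-- ===== PORT A =====
-- A's inner `while i < len(lines)` loop: consume lines until one containing "-->" (raw-line check)
def aInner : List (List Char) → List (List Char) × List (List Char)
  | [] => ([], [])
  | l :: ls =>
    if PySem.Chars.isIn pvArrow l then ([l], ls)
    else ((l :: (aInner ls).1), (aInner ls).2)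

theorem aInner_len (ls : List (List Char)) : (aInner ls).2.length ≤ ls.length := by
  induction ls with
  | nil => simp [aInner]
  | cons l ls ih =>
    simp only [aInner]
    split
    · simp
    · simp only [List.length_cons]; omega

-- A's outer `while` loop, returning (preamble_lines, lines[i:])
def aOuter : List (List Char) → List (List Char) × List (List Char)
  | [] => ([], [])
  | l :: ls =>
    if PySem.Chars.strip l = [] then
      ((l :: (aOuter ls).1), (aOuter ls).2)
    else if PySem.Chars.startswith (PySem.Chars.strip l) pvOpen then
      if PySem.Chars.isIn pvArrow (PySem.Chars.strip l) = false ∨ PySem.Chars.strip l = pvOpen then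
        ((l :: ((aInner ls).1 ++ (aOuter (aInner ls).2).1)), (aOuter (aInner ls).2).2)
      else ((l :: (aOuter ls).1), (aOuter ls).2)
    else ([], l :: ls)
termination_by ls => ls.length
decreasing_by
  all_goals simp
  all_goals first
    | omega
    | (have := aInner_len ls; omega)

def split_preamble (text : String) : String × String :=
  ((String.ofList (aOuter (splitK text.toList)).1.flatten),   -- "".join(preamble_lines)
   (String.ofList (aOuter (splitK text.toList)).2.flatten))   -- "".join(lines[i:])

-- ===== PORT B =====
-- B's single flat loop over the lines, carrying (in_comment, cut); returns the final offset cut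
def bLoop (inComment : Bool) (cut : Nat) : List (List Char) → Nat
  | [] => cut
  | l :: ls =>
    if inComment then
      bLoop (!(PySem.Chars.isIn pvArrow l)) (cut + l.length) ls
    else if PySem.Chars.strip l = [] then
      bLoop false (cut + l.length) ls
    else if PySem.Chars.startswith (PySem.Chars.strip l) pvOpen then
      bLoop (!(PySem.Chars.isIn pvArrow (PySem.Chars.strip l))) (cut + l.length) ls
    else cut

def split_preamble_alt (text : String) : String × String :=
  -- text[:cut], text[cut:] with cut ≥ 0 : exactly take/drop
  ((String.ofList (text.toList.take (bLoop false 0 (splitK text.toList)))),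
   (String.ofList (text.toList.drop (bLoop false 0 (splitK text.toList)))))

-- ===== PRECONDITION & SPEC =====
def Spec_split_preamble (text : String) (out : String × String) : Prop := out = split_preamble_alt text
instance (text : String) (out : String × String) : Decidable (Spec_split_preamble text out) := by unfold Spec_split_preamble; infer_instance

-- ===== CLAIM (what is proved, stated in full; the proofs are below) =====
def Claim_equal_split_preamble : Prop := ∀ (text : String), Dom_split_preamble text → Spec_split_preamble text (split_preamble text)

-- ===== LEMMAS AND PROOFS =====

theorem flatten_splitKgo (cur cs : List Char) :
    (splitKgo cur cs).flatten = cur.reverse ++ cs := by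
  induction cur, cs using splitKgo.induct <;> simp_all [splitKgo]

theorem flatten_splitK (cs : List Char) : (splitK cs).flatten = cs := by
  simpa using flatten_splitKgo [] cs

theorem bLoop_shift (inc : Bool) (cut : Nat) (ls : List (List Char)) :
    bLoop inc cut ls = cut + bLoop inc 0 ls := by
  induction ls generalizing inc cut with
  | nil => simp [bLoop]
  | cons l ls ih =>
    simp only [bLoop]
    split
    · rw [ih, ih _ (0 + l.length)]; omega
    · split
      · rw [ih, ih _ (0 + l.length)]; omega
      · split
        · rw [ih, ih _ (0 + l.length)]; omega
        · omega

theorem inner_spec (ls : List (List Char)) :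
    (aInner ls).1 ++ (aInner ls).2 = ls ∧
    bLoop true 0 ls = (aInner ls).1.flatten.length + bLoop false 0 (aInner ls).2 := by
  induction ls with
  | nil => simp [aInner, bLoop]
  | cons l ls ih =>
    by_cases h : PySem.Chars.isIn pvArrow l
    · refine ⟨by simp [aInner, h], ?_⟩
      have hb : bLoop true 0 (l :: ls) = l.length + bLoop false 0 ls := by
        simp only [bLoop]; simp [h]; rw [bLoop_shift]
      rw [hb]; simp [aInner, h]
    · refine ⟨by simp [aInner, h, ih.1], ?_⟩
      have hb : bLoop true 0 (l :: ls) = l.length + bLoop true 0 ls := by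
        simp only [bLoop]; simp [h]; rw [bLoop_shift]
      rw [hb, ih.2]; simp [aInner, h]; omega

theorem outer_spec (ls : List (List Char)) :
    (aOuter ls).1 ++ (aOuter ls).2 = ls ∧
    bLoop false 0 ls = (aOuter ls).1.flatten.length := by
  fun_induction aOuter ls with
  | case1 => simp [bLoop]
  | case2 l ls hblank ih =>
    refine ⟨by simp [ih.1], ?_⟩
    have hb : bLoop false 0 (l :: ls) = l.length + bLoop false 0 ls := by
      simp only [bLoop]; simp [hblank]; rw [bLoop_shift]
    rw [hb, ih.2]; simp
  | case3 l ls hblank hopen hcond ih =>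
    have harr : PySem.Chars.isIn pvArrow (PySem.Chars.strip l) = false := by
      rcases hcond with h | h
      · exact h
      · rw [h]; decide
    have hin := inner_spec ls
    refine ⟨by simp [List.append_assoc, ih.1, hin.1], ?_⟩
    have hb : bLoop false 0 (l :: ls) = l.length + bLoop true 0 ls := by
      simp only [bLoop]; simp [hblank, hopen, harr]; rw [bLoop_shift]
    rw [hb, hin.2, ih.2]; simp
  | case4 l ls hblank hopen hcond ih =>
    have harr : PySem.Chars.isIn pvArrow (PySem.Chars.strip l) = true := by
      by_contra h
      exact hcond (Or.inl (by simpa using h))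
    refine ⟨by simp [ih.1], ?_⟩
    have hb : bLoop false 0 (l :: ls) = l.length + bLoop false 0 ls := by
      simp only [bLoop]; simp [hblank, hopen, harr]; rw [bLoop_shift]
    rw [hb, ih.2]; simp
  | case5 l ls hblank hopen =>
    refine ⟨by simp, ?_⟩
    simp [bLoop, hblank, hopen]

-- ===== VERDICT (by name: the statement is the Claim_ definition above) =====
theorem split_preamble_spec : Claim_equal_split_preamble := by
  intro text _
  unfold Spec_split_preamble split_preamble split_preamble_alt
  set Ls := splitK text.toList with hLs
  obtain ⟨h1, h2⟩ := outer_spec Ls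
  have hfl : (aOuter Ls).1.flatten ++ (aOuter Ls).2.flatten = text.toList := by
    rw [← List.flatten_append, h1, hLs, flatten_splitK]
  have htake : text.toList.take ((aOuter Ls).1.flatten.length) = (aOuter Ls).1.flatten := by
    rw [← hfl]; exact List.take_left
  have hdrop : text.toList.drop ((aOuter Ls).1.flatten.length) = (aOuter Ls).2.flatten := by
    rw [← hfl]; exact List.drop_left
  rw [h2, htake, hdrop]
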